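-- pv_equiv track=rewrite | github.com/joopeed/lp1 | 122.py | quantos_comeram
-- ===== SOURCE A (Python) =====
-- def quantos_comeram(n,fila):
-- 	soma=0
-- 	ok=True
-- 	for i in fila:
-- 		if i <=n and ok:
-- 			n-=i
-- 		else:
-- 			soma+=i
-- 			ok=False
-- 	soma = sum(fila)-soma
-- 	return soma
-- ===== SOURCE B (Python) =====
-- def quantos_comeram(n, fila):
--     # stage 1: prefix-sum table; prefix[k] = sum of first k items
--     prefix = [0]
--     for i in fila:
--         prefix.append(prefix[-1] + i)
--     # stage 2: cut point = largest k reachable while prefix sums stay <= n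
--     k = 0
--     while k + 1 < len(prefix) and prefix[k + 1] <= n:
--         k += 1
--     return prefix[k]
-- ===== Notes on version B (the rewrite author's own statement) =====
-- stated objective: alternative
-- what changed: A makes one greedy pass mutating n behind an ok-flag, sums the uneaten suffix and subtracts it from sum(fila); B instead builds a prefix-sum table and then scans it for the cut point (largest index whose prefix sums all stay <= the original n), returning that prefix sum directly.
import Mathlib
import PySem

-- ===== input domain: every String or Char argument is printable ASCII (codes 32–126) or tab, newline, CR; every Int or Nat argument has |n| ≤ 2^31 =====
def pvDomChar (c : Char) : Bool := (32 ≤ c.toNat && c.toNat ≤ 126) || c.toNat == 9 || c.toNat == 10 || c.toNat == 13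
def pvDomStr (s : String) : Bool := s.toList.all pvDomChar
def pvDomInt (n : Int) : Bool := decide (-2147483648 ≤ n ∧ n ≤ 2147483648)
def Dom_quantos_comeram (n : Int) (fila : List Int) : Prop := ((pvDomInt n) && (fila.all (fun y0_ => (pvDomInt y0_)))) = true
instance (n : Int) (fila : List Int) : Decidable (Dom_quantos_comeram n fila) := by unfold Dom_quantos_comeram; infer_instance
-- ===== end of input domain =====

-- B replaces A's greedy pass (flag + complement of the uneaten suffix) with a prefix-sum
-- table plus a cut-point scan against the original n (objective: alternative).


-- ===== PORT A =====
-- loop state (n, soma, ok); after the loop A returns sum(fila) - soma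
def quantosLoopA : List Int → Int × Int × Bool → Int × Int × Bool
  | [], st => st
  | i :: rest, (n, soma, ok) =>
      if i ≤ n ∧ ok = true then quantosLoopA rest (n - i, soma, ok)
      else quantosLoopA rest (n, soma + i, false)

def quantos_comeram (n : Int) (fila : List Int) : Int :=
  fila.sum - (quantosLoopA fila (n, 0, true)).2.1

-- ===== PORT B =====
-- stage 1 of Source B: prefix = [0]; for i in fila: prefix.append(prefix[-1] + i)
def buildPrefix (fila : List Int) : List Int :=
  fila.foldl (fun acc i => acc ++ [(acc.getLast?).getD 0 + i]) [0]

-- stage 2 of Source B: while k+1 < len(prefix) and prefix[k+1] <= n: k += 1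
def scanCut (pre : List Int) (n : Int) (k : Nat) : Nat :=
  if h : k + 1 < pre.length ∧ pre.getD (k + 1) 0 ≤ n then scanCut pre n (k + 1) else k
termination_by pre.length - k
decreasing_by omega

def quantos_comeram_alt (n : Int) (fila : List Int) : Int :=
  let pre := buildPrefix fila
  pre.getD (scanCut pre n 0) 0

-- ===== PRECONDITION & SPEC =====
def Spec_quantos_comeram (n : Int) (fila : List Int) (out : Int) : Prop := out = quantos_comeram_alt n fila
instance (n : Int) (fila : List Int) (out : Int) : Decidable (Spec_quantos_comeram n fila out) := by unfold Spec_quantos_comeram; infer_instance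

-- ===== CLAIM (what is proved, stated in full; the proofs are below) =====
def Claim_equal_quantos_comeram : Prop := ∀ (n : Int) (fila : List Int), Dom_quantos_comeram n fila → Spec_quantos_comeram n fila (quantos_comeram n fila)

-- ===== LEMMAS AND PROOFS =====

-- reference value: total eaten, defined structurally (proof-only helper)
def eaten (n : Int) : List Int → Int
  | [] => 0
  | i :: rest => if i > n then 0 else i + eaten (n - i) rest

-- running sums of fila starting from s (tail of the prefix-sum table)
def tsums (s : Int) : List Int → List Int
  | [] => []
  | i :: rest => (s + i) :: tsums (s + i) rest

theorem tsums_length (s : Int) (l : List Int) : (tsums s l).length = l.length := by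
  induction l generalizing s with
  | nil => rfl
  | cons i r ih => simp [tsums, ih]

-- stage 1 computes acc ++ tsums s fila whenever acc ends with s
theorem foldl_build (fila : List Int) (acc : List Int) (s : Int)
    (h : acc.getLast? = some s) :
    fila.foldl (fun acc i => acc ++ [(acc.getLast?).getD 0 + i]) acc = acc ++ tsums s fila := by
  induction fila generalizing acc s with
  | nil => simp [tsums]
  | cons i rest ih =>
      simp only [List.foldl_cons, tsums, h, Option.getD_some]
      rw [ih (acc ++ [s + i]) (s + i) (by simp)]
      simp

theorem buildPrefix_eq (fila : List Int) : buildPrefix fila = 0 :: tsums 0 fila := by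
  unfold buildPrefix
  rw [foldl_build fila [0] 0 rfl]
  rfl

-- the cut-point scan over front ++ tsums s fila, entered at k = front.length,
-- lands on the value s + eaten (n - s) fila
theorem scanCut_eaten (fila : List Int) (front : List Int) (s n : Int)
    (hk : front.getLast? = some s) :
    (front ++ tsums s fila).getD (scanCut (front ++ tsums s fila) n (front.length - 1)) 0
      = s + eaten (n - s) fila := by
  have hfront : front ≠ [] := by intro h; simp [h] at hk
  have hlen : 1 ≤ front.length := List.length_pos_iff.mpr hfront
  induction fila generalizing front s n with
  | nil =>
      rw [scanCut]
      rw [dif_neg (by simp [tsums]; omega)]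
      simp [tsums, eaten]
      rw [List.getLast?_eq_getElem?] at hk
      simp [hk]
  | cons i rest ih =>
      have hget : (front ++ tsums s (i :: rest)).getD front.length 0 = s + i := by
        rw [List.getD_eq_getElem?_getD, List.getElem?_append_right (by omega)]
        simp [tsums]
      have hidx : front.length - 1 + 1 = front.length := by omega
      rw [scanCut]
      by_cases hc : s + i ≤ n
      · rw [dif_pos (by
          refine ⟨by simp [tsums_length]; omega, ?_⟩
          rw [hidx, hget]; exact hc)]
        have hre : front ++ tsums s (i :: rest) = (front ++ [s + i]) ++ tsums (s + i) rest := by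
          simp [tsums]
        have hidx2 : front.length = (front ++ [s + i]).length - 1 := by simp
        rw [hidx, hre, hidx2]
        rw [ih (front ++ [s + i]) (s + i) n (by simp) (by simp) (by simp)]
        rw [show eaten (n - s) (i :: rest) = i + eaten (n - s - i) rest from by
          rw [eaten, if_neg (by omega)]]
        rw [show n - (s + i) = n - s - i by ring]
        ring
      · rw [dif_neg (by
          intro ⟨h1, h2⟩
          rw [hidx, hget] at h2; omega)]
        rw [show eaten (n - s) (i :: rest) = 0 from by rw [eaten, if_pos (by omega)]]
        rw [List.getD_eq_getElem?_getD, List.getElem?_append_left (by omega)]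
        rw [List.getLast?_eq_getElem?] at hk
        simp [hk]

-- B computes 'eaten'
theorem alt_eq_eaten (n : Int) (fila : List Int) : quantos_comeram_alt n fila = eaten n fila := by
  unfold quantos_comeram_alt
  rw [buildPrefix_eq]
  have := scanCut_eaten fila [0] 0 n rfl
  simpa using this

-- A's loop: once ok = false, every remaining item is added to soma
theorem quantosLoopA_false (l : List Int) (n soma : Int) :
    (quantosLoopA l (n, soma, false)).2.1 = soma + l.sum := by
  induction l generalizing n soma with
  | nil => simp [quantosLoopA]
  | cons i rest ih =>
      simp only [quantosLoopA, List.sum_cons]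
      rw [if_neg (by simp)]
      rw [ih]; ring

-- with ok = true, the final soma is soma + sum l minus the eaten amount
theorem quantosLoopA_true (l : List Int) (n soma : Int) :
    (quantosLoopA l (n, soma, true)).2.1 = soma + l.sum - eaten n l := by
  induction l generalizing n soma with
  | nil => simp [quantosLoopA, eaten]
  | cons i rest ih =>
      by_cases h : i ≤ n
      · simp only [quantosLoopA, List.sum_cons, eaten]
        rw [if_pos (by simp [h]), if_neg (by omega)]
        rw [ih]; ring
      · simp only [quantosLoopA, List.sum_cons, eaten]
        rw [if_neg (by simp [h]), if_pos (by omega)]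
        rw [quantosLoopA_false]; ring

-- ===== VERDICT (by name: the statement is the Claim_ definition above) =====
theorem quantos_comeram_spec : Claim_equal_quantos_comeram := by
  intro n fila _
  unfold Spec_quantos_comeram quantos_comeram
  rw [quantosLoopA_true, alt_eq_eaten]
  ring
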